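-- pv_equiv track=rewrite | github.com/sparkuru/genshin | code/python/24-markdown-tool.py | _unflatten_table_rows
-- ===== SOURCE A (Python) =====
-- from typing import Dict, List
--
-- def _unflatten_table_rows(
--     rows_cells: List[List[str]], num_cols: int
-- ) -> List[List[str]]:
--     """
--     Restore merged-cell hierarchy: carry previous row for leading columns, then blank
--     cells that repeat the row above (by logical value) so the table shows merged-cell structure.
--     """
--     if num_cols <= 0 or not rows_cells:
--         return rows_cells
--     prev: List[str] = [""] * num_cols
--     full: List[List[str]] = []
--     for row in rows_cells:
--         if len(row) != num_cols:
--             row = (row + [""] * num_cols)[:num_cols]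
--         non_empty_count = sum(1 for c in row if c.strip() != "")
--         leading = max(0, num_cols - non_empty_count)
--         non_empty_cells = [c for c in row if c.strip() != ""]
--         tail_len = num_cols - leading
--         tail = (non_empty_cells + [""] * tail_len)[:tail_len]
--         new_row = prev[:leading] + tail
--         full.append(new_row)
--         prev = new_row
--     hierarchy_cols = min(2, num_cols)
--     out: List[List[str]] = []
--     for i, row in enumerate(full):
--         if i == 0:
--             out.append(list(row))
--         else:
--             out.append(
--                 [
--                     "" if (j < hierarchy_cols and row[j] == full[i - 1][j]) else row[j]
--                     for j in range(num_cols)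
--                 ]
--             )
--     return out
-- ===== SOURCE B (Python) =====
-- def _unflatten_table_rows(rows_cells, num_cols):
--     if num_cols <= 0 or not rows_cells:
--         return rows_cells
--     # One pass to extract each row's non-empty tail; then build the table
--     # COLUMN BY COLUMN: within a column, a cell either comes from that row's
--     # tail (when the tail reaches this column) or is inherited from above.
--     tails = [[c for c in (row + [""] * num_cols)[:num_cols] if c.strip() != ""]
--              for row in rows_cells]
--     h = min(2, num_cols)
--     cols = []
--     for j in range(num_cols):
--         col = []
--         cur = ""  # the column's current hierarchical value (row above, filled)
--         for i, t in enumerate(tails):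
--             start = num_cols - len(t)
--             if start <= j:
--                 v = t[j - start]
--                 col.append("" if (i > 0 and j < h and v == cur) else v)
--                 cur = v
--             else:
--                 col.append("" if (i > 0 and j < h) else cur)
--         cols.append(col)
--     return [[cols[j][i] for j in range(num_cols)] for i in range(len(rows_cells))]
-- ===== Notes on version B (the rewrite author's own statement) =====
-- stated objective: alternative
-- what changed: Replaced A's row-major two-pass algorithm (scan carrying the previous full row, then a second pass blanking repeats) by a column-major construction: extract each row's non-empty tail once, then build every column top-to-bottom with a per-column carried value (a cell either comes from its row's tail or is inherited from above, and inherited cells in hierarchy columns are blank by construction), finally transposing columns back to rows.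
import Mathlib
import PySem

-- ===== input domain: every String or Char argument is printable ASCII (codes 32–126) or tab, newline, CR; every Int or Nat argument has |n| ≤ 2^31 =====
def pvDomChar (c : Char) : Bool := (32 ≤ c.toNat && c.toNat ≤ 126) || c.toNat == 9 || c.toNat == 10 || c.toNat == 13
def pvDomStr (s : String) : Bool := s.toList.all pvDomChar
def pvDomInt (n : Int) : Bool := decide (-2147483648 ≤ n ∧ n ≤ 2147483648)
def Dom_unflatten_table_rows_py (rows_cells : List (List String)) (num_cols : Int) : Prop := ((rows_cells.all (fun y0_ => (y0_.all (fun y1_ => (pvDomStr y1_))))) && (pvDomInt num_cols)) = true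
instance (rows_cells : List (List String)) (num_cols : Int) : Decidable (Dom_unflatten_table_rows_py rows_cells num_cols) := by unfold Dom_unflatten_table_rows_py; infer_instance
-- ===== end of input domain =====

-- B rebuilds the table COLUMN-MAJOR from each row's non-empty tail (per-column carry,
-- then transpose) instead of A's two row-major passes; return values proved equal.

-- ===== PORT A =====
-- loop body of A's first pass, named so the foldl below can use it
def pvStepA (n : Nat) (prev row0 : List String) : List String :=
  let row := if row0.length ≠ n then (row0 ++ List.replicate n "").take n else row0
  let nonEmptyCount := row.countP (fun c => PySem.Str.strip c != "")
  -- leading = max(0, num_cols - non_empty_count) is ≥ 0, so .toNat is exact and prev[:leading] = take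
  let leading := (max 0 ((n : Int) - nonEmptyCount)).toNat
  let nonEmptyCells := row.filter (fun c => PySem.Str.strip c != "")
  -- tail_len = num_cols - leading; non_empty_count ≤ n so tail_len ≥ 0 and Nat subtraction is exact
  let tailLen := n - leading
  let tail := (nonEmptyCells ++ List.replicate tailLen "").take tailLen
  prev.take leading ++ tail

def unflatten_table_rows_py (rows_cells : List (List String)) (num_cols : Int) : List (List String) :=
  if num_cols ≤ 0 ∨ rows_cells = [] then rows_cells
  else
    let n := num_cols.toNat
    let full := (rows_cells.foldl (fun (st : List String × List (List String)) row =>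
        let new_row := pvStepA n st.1 row
        (new_row, st.2 ++ [new_row])) (List.replicate n "", [])).2
    let h := min 2 n
    -- second pass: enumerate(full); row[j] and full[i-1][j] are always in range (every row has length n)
    full.zipIdx.map (fun p =>
      if p.2 = 0 then p.1
      else (List.range n).map (fun j =>
        if j < h ∧ p.1.getD j "" = (full.getD (p.2 - 1) []).getD j "" then ""
        else p.1.getD j ""))

-- ===== PORT B =====
-- B's tail extraction: pad/truncate the row to n, keep the non-blank cells
def pvTail (n : Nat) (row : List String) : List String :=
  ((row ++ List.replicate n "").take n).filter (fun c => PySem.Str.strip c != "")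

def unflatten_table_rows_py_alt (rows_cells : List (List String)) (num_cols : Int) : List (List String) :=
  if num_cols ≤ 0 ∨ rows_cells = [] then rows_cells
  else
    let n := num_cols.toNat
    let tails := rows_cells.map (pvTail n)
    let h := min 2 n
    -- column j, built top-to-bottom with the carried value cur; len(t) ≤ n so the
    -- Nat subtractions are exact and t[j - start] is always in range (getD is exact)
    let cols := (List.range n).map (fun j =>
      (tails.zipIdx.foldl (fun (st : String × List String) p =>
        let s := n - p.1.length
        if s ≤ j then
          let v := p.1.getD (j - s) ""
          (v, st.2 ++ [if p.2 > 0 ∧ j < h ∧ v = st.1 then "" else v])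
        else
          (st.1, st.2 ++ [if p.2 > 0 ∧ j < h then "" else st.1]))
        ("", [])).2)
    -- transpose: cols[j][i] is always in range (getD is exact)
    (List.range rows_cells.length).map (fun i =>
      (List.range n).map (fun j => (cols.getD j []).getD i ""))

-- ===== PRECONDITION & SPEC =====
def Spec_unflatten_table_rows_py (rows_cells : List (List String)) (num_cols : Int) (out : List (List String)) : Prop := out = unflatten_table_rows_py_alt rows_cells num_cols
instance (rows_cells : List (List String)) (num_cols : Int) (out : List (List String)) : Decidable (Spec_unflatten_table_rows_py rows_cells num_cols out) := by unfold Spec_unflatten_table_rows_py; infer_instance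

-- ===== CLAIM (what is proved, stated in full; the proofs are below) =====
def Claim_equal_unflatten_table_rows_py : Prop := ∀ (rows_cells : List (List String)) (num_cols : Int), Dom_unflatten_table_rows_py rows_cells num_cols → Spec_unflatten_table_rows_py rows_cells num_cols (unflatten_table_rows_py rows_cells num_cols)

-- ===== LEMMAS AND PROOFS =====

-- simplified form of A's step: splice the tail onto the previous row
def pvStepB (n : Nat) (prev row : List String) : List String :=
  prev.take (n - (pvTail n row).length) ++ pvTail n row

theorem pvTail_len_le (n : Nat) (row : List String) : (pvTail n row).length ≤ n := by
  calc (pvTail n row).length ≤ ((row ++ List.replicate n "").take n).length :=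
        List.length_filter_le _ _
  _ ≤ n := by simp [List.length_take]

theorem pvStepA_eq_stepB (n : Nat) (prev row : List String) :
    pvStepA n prev row = pvStepB n prev row := by
  simp only [pvStepA, pvStepB, pvTail]
  have hpad : (if row.length ≠ n then (row ++ List.replicate n "").take n else row)
      = (row ++ List.replicate n "").take n := by
    split_ifs with h
    · rfl
    · simp only [not_not] at h
      simp [h]
  rw [hpad]
  have hc : (((row ++ List.replicate n "").take n).filter
      (fun c => PySem.Str.strip c != "")).length ≤ n := pvTail_len_le n row
  rw [List.countP_eq_length_filter]
  have hlead : (max 0 ((n : Int) - (((row ++ List.replicate n "").take n).filter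
      (fun c => PySem.Str.strip c != "")).length)).toNat
      = n - (((row ++ List.replicate n "").take n).filter
      (fun c => PySem.Str.strip c != "")).length := by omega
  rw [hlead]
  have htl : n - (n - (((row ++ List.replicate n "").take n).filter
      (fun c => PySem.Str.strip c != "")).length)
      = (((row ++ List.replicate n "").take n).filter
      (fun c => PySem.Str.strip c != "")).length := by omega
  rw [htl]
  simp [List.take_append]

theorem pvStepB_length (n : Nat) (prev row : List String) (h : prev.length = n) :
    (pvStepB n prev row).length = n := by
  have := pvTail_len_le n row
  simp [pvStepB, List.length_append, List.length_take, h]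
  omega

-- the cell of a spliced row: from the tail when it reaches column j, else inherited
theorem pvStepB_getD (n : Nat) (prev row : List String) (j : Nat)
    (hp : prev.length = n) (hj : j < n) :
    (pvStepB n prev row).getD j "" =
      if n - (pvTail n row).length ≤ j
      then (pvTail n row).getD (j - (n - (pvTail n row).length)) ""
      else prev.getD j "" := by
  have ht := pvTail_len_le n row
  have hlen : (prev.take (n - (pvTail n row).length)).length = n - (pvTail n row).length := by
    simp [List.length_take, hp]
  simp only [pvStepB]
  split_ifs with h
  · rw [List.getD_append_right (h := by rw [hlen]; omega), hlen]
  · rw [List.getD_append (h := by rw [hlen]; omega)]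
    rw [List.getD_eq_getElem _ "" (by rw [hlen]; omega),
        List.getD_eq_getElem prev "" (by omega)]
    simp [List.getElem_take]

-- the scan of full rows that A's first pass builds
def pvScan (n : Nat) (prev : List String) : List (List String) → List (List String)
  | [] => []
  | row :: rest => pvStepB n prev row :: pvScan n (pvStepB n prev row) rest

theorem pvScan_length (n : Nat) (prev : List String) (rows : List (List String)) :
    (pvScan n prev rows).length = rows.length := by
  induction rows generalizing prev with
  | nil => rfl
  | cons r rs ih => simp [pvScan, ih]

theorem pvScan_mem_length (n : Nat) (prev : List String) (rows : List (List String))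
    (hp : prev.length = n) : ∀ x ∈ pvScan n prev rows, x.length = n := by
  induction rows generalizing prev with
  | nil => simp [pvScan]
  | cons r rs ih =>
    intro x hx
    simp only [pvScan, List.mem_cons] at hx
    rcases hx with h | h
    · subst h; exact pvStepB_length n prev r hp
    · exact ih (pvStepB n prev r) (pvStepB_length n prev r hp) x h

-- A's foldl (with its body rewritten to pvStepB) builds exactly pvScan
theorem pvFoldA_eq_scan (n : Nat) (rows : List (List String)) (prev : List String)
    (acc : List (List String)) :
    (rows.foldl (fun (st : List String × List (List String)) row =>
        (pvStepB n st.1 row, st.2 ++ [pvStepB n st.1 row])) (prev, acc)).2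
      = acc ++ pvScan n prev rows := by
  induction rows generalizing prev acc with
  | nil => simp [pvScan]
  | cons r rs ih => simp [pvScan, List.foldl_cons, ih]

-- B's column loop as a recursion; `first` replaces the index test i > 0
def pvCol (n h j : Nat) (first : Bool) (cur : String) : List (List String) → List String
  | [] => []
  | t :: ts =>
    if n - t.length ≤ j then
      (if ¬first ∧ j < h ∧ t.getD (j - (n - t.length)) "" = cur then ""
       else t.getD (j - (n - t.length)) "")
        :: pvCol n h j false (t.getD (j - (n - t.length)) "") ts
    else
      (if ¬first ∧ j < h then "" else cur) :: pvCol n h j false cur ts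

-- B's foldl with start index k ≥ 1 is pvCol with first = false
theorem pvFoldB_eq_col (n h j : Nat) (ts : List (List String)) (k : Nat) (hk : k ≠ 0)
    (cur : String) (acc : List String) :
    ((ts.zipIdx k).foldl (fun (st : String × List String) p =>
        let s := n - p.1.length
        if s ≤ j then
          (p.1.getD (j - s) "",
           st.2 ++ [if p.2 > 0 ∧ j < h ∧ p.1.getD (j - s) "" = st.1 then ""
                    else p.1.getD (j - s) ""])
        else
          (st.1, st.2 ++ [if p.2 > 0 ∧ j < h then "" else st.1]))
        (cur, acc)).2
      = acc ++ pvCol n h j false cur ts := by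
  induction ts generalizing k cur acc with
  | nil => simp [pvCol]
  | cons t rest ih =>
    simp only [List.zipIdx, List.foldl_cons, pvCol]
    by_cases hs : n - t.length ≤ j
    · rw [if_pos hs, if_pos hs]
      have : (k > 0) = True := by simp; omega
      rw [ih (k + 1) (by omega)]
      simp [this]
    · rw [if_neg hs, if_neg hs]
      have : (k > 0) = True := by simp; omega
      rw [ih (k + 1) (by omega)]
      simp [this]

-- B's whole foldl is pvCol with first = true
theorem pvFoldB_top (n h j : Nat) (ts : List (List String)) (cur : String) :
    ((ts.zipIdx).foldl (fun (st : String × List String) p =>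
        let s := n - p.1.length
        if s ≤ j then
          (p.1.getD (j - s) "",
           st.2 ++ [if p.2 > 0 ∧ j < h ∧ p.1.getD (j - s) "" = st.1 then ""
                    else p.1.getD (j - s) ""])
        else
          (st.1, st.2 ++ [if p.2 > 0 ∧ j < h then "" else st.1]))
        (cur, [])).2
      = pvCol n h j true cur ts := by
  cases ts with
  | nil => rfl
  | cons t rest =>
    simp only [List.zipIdx, List.foldl_cons, pvCol]
    by_cases hs : n - t.length ≤ j
    · rw [if_pos hs, if_pos hs, pvFoldB_eq_col n h j rest 1 (by omega)]
      simp
    · rw [if_neg hs, if_neg hs, pvFoldB_eq_col n h j rest 1 (by omega)]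
      simp

theorem pvCol_length (n h j : Nat) (first : Bool) (cur : String) (ts : List (List String)) :
    (pvCol n h j first cur ts).length = ts.length := by
  induction ts generalizing first cur with
  | nil => rfl
  | cons t rest ih =>
    simp only [pvCol]
    split_ifs <;> simp [ih]

-- the crux: cell i of column j equals A's blanked cell, expressed through the scan
theorem pvCol_get (n h j : Nat) (rows : List (List String)) (prev : List String)
    (first : Bool) (i : Nat) (hi : i < rows.length)
    (hp : prev.length = n) (hj : j < n) (cur : String) (hcur : cur = prev.getD j "") :
    (pvCol n h j first cur (rows.map (pvTail n)))[i]'(by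
        rw [pvCol_length]; simpa using hi) =
      if first ∧ i = 0 then
        ((pvScan n prev rows).getD i []).getD j ""
      else if j < h ∧ ((pvScan n prev rows).getD i []).getD j ""
            = (if i = 0 then prev else (pvScan n prev rows).getD (i-1) []).getD j "" then ""
      else ((pvScan n prev rows).getD i []).getD j "" := by
  induction rows generalizing prev first i cur with
  | nil => simp at hi
  | cons r rs ih =>
    subst hcur
    have hstep := pvStepB_getD n prev r j hp hj
    match i with
    | 0 =>
      have hsc0 : (pvScan n prev (r :: rs)).getD 0 [] = pvStepB n prev r := by
        simp [pvScan]
      simp only [List.map_cons, pvCol]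
      by_cases hs : n - (pvTail n r).length ≤ j
      · rw [if_pos hs] at hstep
        simp only [if_pos hs, List.getElem_cons_zero, hsc0, hstep]
        cases first <;> simp
      · rw [if_neg hs] at hstep
        simp only [if_neg hs, List.getElem_cons_zero, hsc0, hstep]
        cases first <;> simp
    | (m+1) =>
      have hm : m < rs.length := by simpa using hi
      have hp' : (pvStepB n prev r).length = n := pvStepB_length n prev r hp
      simp only [List.map_cons, pvCol]
      by_cases hs : n - (pvTail n r).length ≤ j
      · rw [if_pos hs] at hstep
        simp only [if_pos hs, List.getElem_cons_succ]
        rw [ih (pvStepB n prev r) false m hm hp' _ hstep.symm]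
        cases m with
        | zero => simp [pvScan]
        | succ k => simp [pvScan]
      · rw [if_neg hs] at hstep
        simp only [if_neg hs, List.getElem_cons_succ]
        rw [ih (pvStepB n prev r) false m hm hp' _ hstep.symm]
        cases m with
        | zero => simp [pvScan]
        | succ k => simp [pvScan]

-- main equality, pointwise through the scan / column characterisations
theorem unflatten_main (rows : List (List String)) (num_cols : Int) :
    unflatten_table_rows_py rows num_cols = unflatten_table_rows_py_alt rows num_cols := by
  unfold unflatten_table_rows_py unflatten_table_rows_py_alt
  split_ifs with hg
  · rfl
  · simp only [pvStepA_eq_stepB]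
    rw [pvFoldA_eq_scan, List.nil_append]
    set n := num_cols.toNat with hn
    set h := min 2 n with hh
    set prev0 : List String := List.replicate n "" with hprev
    have hp0 : prev0.length = n := by simp [hprev]
    set sc := pvScan n prev0 rows with hsc
    have hscl : sc.length = rows.length := pvScan_length n prev0 rows
    -- rewrite each built column via pvCol
    have hcols : (List.range n).map (fun j =>
        (((rows.map (pvTail n)).zipIdx).foldl (fun (st : String × List String) p =>
          let s := n - p.1.length
          if s ≤ j then
            (p.1.getD (j - s) "",
             st.2 ++ [if p.2 > 0 ∧ j < h ∧ p.1.getD (j - s) "" = st.1 then ""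
                      else p.1.getD (j - s) ""])
          else
            (st.1, st.2 ++ [if p.2 > 0 ∧ j < h then "" else st.1]))
          ("", [])).2)
        = (List.range n).map (fun j => pvCol n h j true "" (rows.map (pvTail n))) := by
      apply List.map_congr_left
      intro j hj
      exact pvFoldB_top n h j (rows.map (pvTail n)) ""
    rw [hcols]
    apply List.ext_getElem
    · simp [hscl]
    · intro i h1 h2
      have hi : i < rows.length := by simpa [hscl] using h1
      have hlt : i < sc.length := hscl ▸ hi
      have hrowlen : ∀ k, (hk : k < sc.length) → sc[k].length = n := by
        intro k hk
        exact pvScan_mem_length n prev0 rows hp0 _ (List.getElem_mem hk)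
      simp only [List.getElem_map, List.getElem_zipIdx, List.getElem_range, Nat.zero_add]
      apply List.ext_getElem
      · by_cases hz : i = 0
        · subst hz; simp [hrowlen 0 (by omega)]
        · simp [if_neg hz]
      · intro j hj1 hj2
        have hjn : j < n := by simpa using hj2
        have hcl : (pvCol n h j true "" (rows.map (pvTail n))).length = rows.length := by
          rw [pvCol_length]; simp
        have hcur0 : prev0.getD j "" = "" := by
          rw [hprev]; exact List.getD_replicate (x := "") hjn
        have hgdi : sc.getD i [] = sc[i]'hlt := List.getD_eq_getElem sc [] hlt
        have hColget' : (pvCol n h j true "" (rows.map (pvTail n))).getD i "" =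
            if i = 0 then (sc.getD i []).getD j ""
            else if j < h ∧ (sc.getD i []).getD j "" = (sc.getD (i-1) []).getD j "" then ""
            else (sc.getD i []).getD j "" := by
          have hc := pvCol_get n h j rows prev0 true i hi hp0 hjn "" hcur0.symm
          rw [← hsc] at hc
          rw [List.getD_eq_getElem _ "" (by rw [hcl]; exact hi)]
          by_cases hz : i = 0
          · simpa [hz] using hc
          · simpa [hz] using hc
        have e1 : ((List.range n).map
              (fun j => pvCol n h j true "" (rows.map (pvTail n)))).getD j []
            = pvCol n h j true "" (rows.map (pvTail n)) := by
          rw [List.getD_eq_getElem _ [] (by simp [hjn])]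
          simp
        simp only [List.getElem_map, List.getElem_range]
        conv_rhs => rw [e1, hColget']
        by_cases hz : i = 0
        · subst hz
          simp only [reduceIte, hgdi]
          rw [List.getD_eq_getElem _ "" (by rw [hrowlen 0 hlt]; exact hjn)]
        · simp only [if_neg hz, List.getElem_map, List.getElem_range, hgdi]

-- ===== VERDICT (by name: the statement is the Claim_ definition above) =====
theorem unflatten_table_rows_py_spec : Claim_equal_unflatten_table_rows_py := by
  intro rows n _
  exact unflatten_main rows n
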